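-- pv_equiv track=rewrite | github.com/ML77777/KR | preprocessing.py | encode_dimacs
-- ===== SOURCE A (Python) =====
-- def encode_dimacs(sudoku_puzzles):
--
--     puzzles = []
--     amount_clauses = 0
--
--     for puzzle in sudoku_puzzles: #Every puzzle is a line of 81 characters
--         encoded_puzzle = ""
--         row = 1
--         column = 1
--         for element in list(puzzle)[:-1]: #Dont include "\n"
--             if element != ".":
--                 clause_line = str(row) + str(column) + element + " 0\n"
--                 amount_clauses += 1
--                 encoded_puzzle += clause_line
--             if column < 9:  #Assuming the 81 characters are indicating from left to right going down each row
--                 column += 1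
--             else:
--                 row += 1
--                 column = 1
--         puzzles.append(encoded_puzzle)
--         break #Testing on 1 puzzle only now
--
--     return puzzles,amount_clauses
-- ===== SOURCE B (Python) =====
-- def encode_dimacs(sudoku_puzzles):
--     if not sudoku_puzzles:
--         return [], 0
--     body = sudoku_puzzles[0][:-1]
--     pieces = []
--     r = 1
--     while body:
--         row_str, body = body[:9], body[9:]
--         for c, ch in enumerate(row_str, 1):
--             if ch != ".":
--                 pieces.append(str(r) + str(c) + ch + " 0\n")
--         r += 1
--     return ["".join(pieces)], len(pieces)
-- ===== Notes on version B (the rewrite author's own statement) =====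
-- stated objective: alternative
-- what changed: Instead of a flat scan over all characters with mutable row/column counters and a reset branch, B slices the puzzle body into 9-character row chunks with a while loop and emits clauses via a nested per-row loop, so the row number is the chunk count and the column is the in-chunk position; clause lines are collected in a list and joined.
import Mathlib
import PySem

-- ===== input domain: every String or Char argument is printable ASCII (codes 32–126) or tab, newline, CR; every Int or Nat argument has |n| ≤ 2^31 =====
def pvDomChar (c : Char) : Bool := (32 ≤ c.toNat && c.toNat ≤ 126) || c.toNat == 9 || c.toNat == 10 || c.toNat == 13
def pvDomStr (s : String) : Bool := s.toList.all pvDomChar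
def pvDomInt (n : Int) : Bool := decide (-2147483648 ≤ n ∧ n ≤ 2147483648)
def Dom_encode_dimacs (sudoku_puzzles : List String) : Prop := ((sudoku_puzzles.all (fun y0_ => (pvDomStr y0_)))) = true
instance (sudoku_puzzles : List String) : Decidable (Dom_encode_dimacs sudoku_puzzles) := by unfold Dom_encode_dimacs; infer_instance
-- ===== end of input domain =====

-- B replaces A's flat scan with mutable row/column counters and a reset branch by a
-- while-loop that slices the body into 9-character row chunks and a nested per-row loop;
-- objective: alternative (same cost, different decomposition).

-- ===== PORT A =====
-- loop body of A: state (encoded_puzzle, row, column, amount_clauses)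
def pvStepA (st : List Char × Int × Int × Int) (element : Char) : List Char × Int × Int × Int :=
  let (enc, row, column, amt) := st
  let (enc, amt) :=
    if element ≠ '.' then
      (enc ++ PySem.Int.toChars row ++ PySem.Int.toChars column ++ [element] ++ (" 0\n".toList), amt + 1)
    else (enc, amt)
  if column < 9 then (enc, row, column + 1, amt) else (enc, row + 1, 1, amt)

def encode_dimacs (sudoku_puzzles : List String) : List String × Int :=
  match sudoku_puzzles with
  | [] => ([], 0)
  | puzzle :: _ =>    -- the loop breaks after the first puzzle
    let st := (PySem.List.slice puzzle.toList none (some (-1))).foldl pvStepA ([], 1, 1, 0)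
    ([String.ofList st.1], st.2.2.2)

-- ===== PORT B =====
-- inner-loop body of B: the clause line (or none) for column index c, cell ch, row r
def pvEmit (r : Int) (p : Int × Char) : Option (List Char) :=
  if p.2 ≠ '.' then
    some (PySem.Int.toChars r ++ PySem.Int.toChars p.1 ++ [p.2] ++ (" 0\n".toList))
  else none

-- the 'for c, ch in enumerate(row_str, 1)' loop of B for one row chunk
def pvRowPieces (r : Int) (row : List Char) : List (List Char) :=
  (PySem.List.enumerate row 1).filterMap (pvEmit r)

-- the 'while body:' loop of B: peel body[:9] / body[9:] chunks, row number r counts chunks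
def pvChunkLoop (body : List Char) (r : Int) : List (List Char) :=
  match body with
  | [] => []
  | x :: xs =>
    pvRowPieces r ((x :: xs).take 9) ++ pvChunkLoop ((x :: xs).drop 9) (r + 1)
termination_by body.length
decreasing_by simp

def encode_dimacs_alt (sudoku_puzzles : List String) : List String × Int :=
  match sudoku_puzzles with
  | [] => ([], 0)
  | puzzle :: _ =>
    let pieces := pvChunkLoop (PySem.List.slice puzzle.toList none (some (-1))) 1
    ([String.ofList pieces.flatten], (pieces.length : Int))

-- ===== PRECONDITION & SPEC =====
def Spec_encode_dimacs (sudoku_puzzles : List String) (out : List String × Int) : Prop := out = encode_dimacs_alt sudoku_puzzles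
instance (sudoku_puzzles : List String) (out : List String × Int) : Decidable (Spec_encode_dimacs sudoku_puzzles out) := by unfold Spec_encode_dimacs; infer_instance

-- ===== CLAIM (what is proved, stated in full; the proofs are below) =====
def Claim_equal_encode_dimacs : Prop := ∀ (sudoku_puzzles : List String), Dom_encode_dimacs sudoku_puzzles → Spec_encode_dimacs sudoku_puzzles (encode_dimacs sudoku_puzzles)

-- ===== LEMMAS AND PROOFS =====

-- unfolding equations for the while-loop port
lemma pvChunkLoop_nil (r : Int) : pvChunkLoop [] r = [] := by
  rw [pvChunkLoop]

lemma pvChunkLoop_cons (x : Char) (xs : List Char) (r : Int) :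
    pvChunkLoop (x :: xs) r =
      pvRowPieces r ((x :: xs).take 9) ++ pvChunkLoop ((x :: xs).drop 9) (r + 1) := by
  rw [pvChunkLoop]

-- A's loop over one row chunk, started at column c ∈ [1,9] with c + |row| ≤ 10,
-- appends exactly B's pieces for that row and advances the counters as stated.
lemma pvRow (r : Int) (row : List Char) : ∀ (c : Nat) (enc : List Char) (amt : Int),
    1 ≤ c → c ≤ 9 → c + row.length ≤ 10 →
    row.foldl pvStepA (enc, r, (c : Int), amt) =
      (enc ++ ((PySem.List.enumerate row (c : Int)).filterMap (pvEmit r)).flatten,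
       (if c + row.length = 10 then r + 1 else r),
       (if c + row.length = 10 then 1 else ((c + row.length : Nat) : Int)),
       amt + ((PySem.List.enumerate row (c : Int)).filterMap (pvEmit r)).length) := by
  induction row with
  | nil =>
    intro c enc amt h1 h9 h10
    have hne : c ≠ 10 := by omega
    simp [PySem.List.enumerate_nil, hne]
  | cons ch rest ih =>
    intro c enc amt h1 h9 h10
    rw [PySem.List.enumerate_cons, List.filterMap_cons]
    have hc1 : ((c : Int) + 1) = ((c + 1 : Nat) : Int) := by push_cast; ring
    by_cases hlt : c < 9
    · -- column < 9: counter increments, recurse at c+1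
      have hA : pvStepA (enc, r, (c : Int), amt) ch =
          ((match pvEmit r ((c : Int), ch) with
            | some l => enc ++ l
            | none => enc),
           r, ((c : Int) + 1),
           (match pvEmit r ((c : Int), ch) with
            | some _ => amt + 1
            | none => amt)) := by
        have hcl : (c : Int) < 9 := by exact_mod_cast hlt
        by_cases hch : ch = '.'
        · simp [pvStepA, pvEmit, hch, hcl]
        · simp [pvStepA, pvEmit, hch, hcl, List.append_assoc]
      rw [List.foldl_cons, hA, hc1,
          ih (c + 1) _ _ (by omega) (by omega) (by simp at h10; omega)]
      have harith : c + (ch :: rest).length = c + 1 + rest.length := by simp; omega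
      rw [harith]
      by_cases hch : ch = '.'
      · simp [pvEmit, hch]
      · simp only [pvEmit, hch, ne_eq, not_false_eq_true, if_true]
        simp only [List.flatten_cons, List.length_cons, List.append_assoc, Prod.mk.injEq]
        refine ⟨by trivial, by trivial, by trivial, by push_cast; ring⟩
    · -- column = 9: this is the last cell of the row; counters reset to (r+1, 1)
      have hc9 : c = 9 := by omega
      have hrest : rest = [] := by
        have := h10
        simp [hc9] at this
        exact List.eq_nil_of_length_eq_zero (by omega)
      subst hrest hc9
      by_cases hch : ch = '.'
      · simp [pvStepA, pvEmit, hch, PySem.List.enumerate_nil]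
      · simp [pvStepA, pvEmit, hch, PySem.List.enumerate_nil, List.append_assoc]

-- A's whole loop equals B's chunked while-loop, in the two components A's result uses.
lemma pvChunk : ∀ (n : Nat) (body : List Char), body.length ≤ n →
    ∀ (r : Int) (enc : List Char) (amt : Int),
    (body.foldl pvStepA (enc, r, 1, amt)).1 = enc ++ (pvChunkLoop body r).flatten ∧
    (body.foldl pvStepA (enc, r, 1, amt)).2.2.2 = amt + (pvChunkLoop body r).length := by
  intro n
  induction n with
  | zero =>
    intro body hlen r enc amt
    have hb : body = [] := List.eq_nil_of_length_eq_zero (by omega)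
    subst hb
    simp [pvChunkLoop_nil]
  | succ m ih =>
    intro body hlen r enc amt
    match body with
    | [] => simp [pvChunkLoop_nil]
    | x :: xs =>
      have hfold : List.foldl pvStepA (enc, r, 1, amt) (x :: xs)
          = List.foldl pvStepA (List.foldl pvStepA (enc, r, 1, amt) ((x :: xs).take 9))
              ((x :: xs).drop 9) := by
        rw [← List.foldl_append, List.take_append_drop]
      rw [hfold]
      have hrow := pvRow r ((x :: xs).take 9) 1 enc amt (by omega) (by omega)
        (by simp; omega)
      simp only [Nat.cast_one] at hrow
      rw [hrow, pvChunkLoop_cons]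
      by_cases hlong : 9 ≤ (x :: xs).length
      · -- full chunk: counters become (r+1, 1); recurse on the dropped tail
        have hfull : 1 + ((x :: xs).take 9).length = 10 := by
          simp only [List.length_take, List.length_cons]
          simp only [List.length_cons] at hlong
          omega
        rw [if_pos hfull, if_pos hfull]
        have hdrop : ((x :: xs).drop 9).length ≤ m := by
          rw [List.length_drop]
          simp only [List.length_cons] at hlen ⊢
          omega
        have hrec := ih ((x :: xs).drop 9) hdrop (r + 1)
          (enc ++ ((PySem.List.enumerate ((x :: xs).take 9) 1).filterMap (pvEmit r)).flatten)
          (amt + ((PySem.List.enumerate ((x :: xs).take 9) 1).filterMap (pvEmit r)).length)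
        refine ⟨?_, ?_⟩
        · rw [hrec.1]
          simp [pvRowPieces, List.append_assoc]
        · rw [hrec.2]
          simp [pvRowPieces]
          ring
      · -- short final chunk: nothing left to fold
        have htake : (x :: xs).take 9 = x :: xs := List.take_of_length_le (by omega)
        have hdrop : (x :: xs).drop 9 = [] := List.drop_eq_nil_of_le (by omega)
        rw [hdrop]
        simp only [List.foldl_nil, pvChunkLoop_nil, List.append_nil]
        constructor
        · simp [pvRowPieces, htake]
        · simp [pvRowPieces, htake]

-- ===== VERDICT (by name: the statement is the Claim_ definition above) =====
theorem encode_dimacs_spec : Claim_equal_encode_dimacs := by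
  intro sudoku_puzzles _
  unfold Spec_encode_dimacs
  match sudoku_puzzles with
  | [] => rfl
  | puzzle :: rest =>
    simp only [encode_dimacs, encode_dimacs_alt]
    have h := pvChunk (PySem.List.slice puzzle.toList none (some (-1))).length
      (PySem.List.slice puzzle.toList none (some (-1))) le_rfl 1 [] 0
    rw [h.1, h.2]
    simp
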